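-- pv_equiv track=rewrite | github.com/TonyLLondon/family_tree | projects/ingest_source/runner/extract_source.py | _expand_with_context
-- ===== SOURCE A (Python) =====
-- def _expand_with_context(pages: list[int], context: int, max_page: int) -> list[int]:
--     out: set[int] = set()
--     for p in pages:
--         for d in range(-context, context + 1):
--             n = p + d
--             if 1 <= n <= max_page:
--                 out.add(n)
--     return sorted(out)
-- ===== SOURCE B (Python) =====
-- def _expand_with_context(pages: list[int], context: int, max_page: int) -> list[int]:
--     if context < 0:
--         return []
--     out: list[int] = []
--     last = 0  # highest page emitted so far (pages are >= 1)
--     for p in sorted(pages):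
--         lo = max(p - context, last + 1, 1)
--         hi = min(p + context, max_page)
--         if lo <= hi:
--             out.extend(range(lo, hi + 1))
--             last = hi
--     return out
-- ===== Notes on version B (the rewrite author's own statement) =====
-- stated objective: faster
-- what changed: Instead of inserting every of the O(len(pages)*context) window members into a set and sorting it, B sorts the pages once and does a single sweep that emits each covered page number exactly once (tracking the highest page emitted so far), so overlapping windows cost nothing.
import Mathlib
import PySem

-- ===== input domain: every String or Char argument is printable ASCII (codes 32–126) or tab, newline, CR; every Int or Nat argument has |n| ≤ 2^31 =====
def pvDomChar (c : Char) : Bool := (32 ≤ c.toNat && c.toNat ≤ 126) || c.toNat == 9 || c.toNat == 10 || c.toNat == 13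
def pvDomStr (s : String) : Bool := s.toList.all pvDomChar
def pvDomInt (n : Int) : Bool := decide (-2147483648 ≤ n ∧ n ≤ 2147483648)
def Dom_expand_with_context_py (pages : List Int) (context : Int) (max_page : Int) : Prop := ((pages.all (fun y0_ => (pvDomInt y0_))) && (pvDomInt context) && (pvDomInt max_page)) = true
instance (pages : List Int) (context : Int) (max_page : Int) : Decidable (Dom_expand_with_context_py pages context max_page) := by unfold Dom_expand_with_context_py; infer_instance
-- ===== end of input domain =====

-- B replaces A's per-page window enumeration into a set plus a final sort by one
-- left-to-right sweep over the sorted pages that emits each covered page once (faster).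

-- ===== PORT A =====
-- A: insert every in-range member of each page's context window into a set, then sort.
def expand_with_context_py (pages : List Int) (context : Int) (max_page : Int) : List Int :=
  let out : PySem.Set Int :=
    pages.foldl
      (fun out p =>
        (PySem.List.pyRange (-context) (context + 1) 1).foldl
          (fun out d =>
            if 1 ≤ p + d ∧ p + d ≤ max_page then PySem.Set.add out (p + d) else out)
          out)
      PySem.Set.empty
  PySem.List.sorted out (fun x => x) false

-- ===== PORT B =====
-- B: sort the pages, then one sweep; `last` is the highest page emitted so far,
-- each clamped window [lo, hi] is emitted as a range starting above `last`.
def expand_with_context_py_alt (pages : List Int) (context : Int) (max_page : Int) : List Int :=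
  if context < 0 then []
  else
    ((PySem.List.sorted pages (fun x => x) false).foldl
      (fun (st : List Int × Int) p =>
        let lo := max (max (p - context) (st.2 + 1)) 1
        let hi := min (p + context) max_page
        if lo ≤ hi then (st.1 ++ PySem.List.pyRange lo (hi + 1) 1, hi) else st)
      ([], 0)).1

-- ===== PRECONDITION & SPEC =====
def Spec_expand_with_context_py (pages : List Int) (context : Int) (max_page : Int) (out : List Int) : Prop := out = expand_with_context_py_alt pages context max_page
instance (pages : List Int) (context : Int) (max_page : Int) (out : List Int) : Decidable (Spec_expand_with_context_py pages context max_page out) := by unfold Spec_expand_with_context_py; infer_instance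

-- ===== CLAIM (what is proved, stated in full; the proofs are below) =====
def Claim_equal_expand_with_context_py : Prop := ∀ (pages : List Int) (context : Int) (max_page : Int), Dom_expand_with_context_py pages context max_page → Spec_expand_with_context_py pages context max_page (expand_with_context_py pages context max_page)

-- ===== LEMMAS AND PROOFS =====

-- two strictly increasing lists with the same members are equal
theorem ssorted_ext (l1 l2 : List Int) (h1 : l1.Pairwise (· < ·)) (h2 : l2.Pairwise (· < ·))
    (h : ∀ n, n ∈ l1 ↔ n ∈ l2) : l1 = l2 := by
  have hn1 : l1.Nodup := h1.imp (fun {a b} hab => by omega)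
  have hn2 : l2.Nodup := h2.imp (fun {a b} hab => by omega)
  have hp : l1.Perm l2 := (List.perm_ext_iff_of_nodup hn1 hn2).mpr h
  exact hp.eq_of_pairwise (fun a b _ _ hab hba => by omega) h1 h2

-- membership in A's inner loop over an arbitrary list of deltas
theorem innerFold_mem (mp p : Int) (ds : List Int) :
    ∀ (s : PySem.Set Int) (n : Int),
      n ∈ ds.foldl (fun out d => if 1 ≤ p + d ∧ p + d ≤ mp then PySem.Set.add out (p + d) else out) s ↔
      n ∈ s ∨ ∃ d ∈ ds, n = p + d ∧ 1 ≤ n ∧ n ≤ mp := by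
  induction ds with
  | nil => simp
  | cons d ds ih =>
    intro s n
    simp only [List.foldl_cons]
    rw [ih]
    split_ifs with h
    · rw [PySem.Set.mem_add]
      constructor
      · rintro (⟨hs | rfl⟩ | ⟨d', hd', rfl, hb⟩)
        · exact Or.inl hs
        · exact Or.inr ⟨d, List.mem_cons_self .., rfl, h⟩
        · exact Or.inr ⟨d', List.mem_cons_of_mem _ hd', rfl, hb⟩
      · rintro (hs | ⟨d', hd', rfl, hb⟩)
        · exact Or.inl (Or.inl hs)
        · rcases List.mem_cons.mp hd' with rfl | hd'
          · exact Or.inl (Or.inr rfl)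
          · exact Or.inr ⟨d', hd', rfl, hb⟩
    · constructor
      · rintro (hs | ⟨d', hd', rfl, hb⟩)
        · exact Or.inl hs
        · exact Or.inr ⟨d', List.mem_cons_of_mem _ hd', rfl, hb⟩
      · rintro (hs | ⟨d', hd', rfl, hb⟩)
        · exact Or.inl hs
        · rcases List.mem_cons.mp hd' with rfl | hd'
          · exact absurd hb h
          · exact Or.inr ⟨d', hd', rfl, hb⟩

theorem innerFold_nodup (mp p : Int) (ds : List Int) :
    ∀ (s : PySem.Set Int), s.Nodup →
      (ds.foldl (fun out d => if 1 ≤ p + d ∧ p + d ≤ mp then PySem.Set.add out (p + d) else out) s).Nodup := by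
  induction ds with
  | nil => intro s hs; simpa using hs
  | cons d ds ih =>
    intro s hs
    simp only [List.foldl_cons]
    split_ifs with h
    · exact ih _ (PySem.Set.nodup_add s _ hs)
    · exact ih _ hs

-- membership in A's outer loop
theorem outerFold_mem (c mp : Int) (pages : List Int) :
    ∀ (s : PySem.Set Int) (n : Int),
      n ∈ pages.foldl
        (fun out p =>
          (PySem.List.pyRange (-c) (c + 1) 1).foldl
            (fun out d => if 1 ≤ p + d ∧ p + d ≤ mp then PySem.Set.add out (p + d) else out) out)
        s ↔
      n ∈ s ∨ (1 ≤ n ∧ n ≤ mp ∧ ∃ p ∈ pages, p - c ≤ n ∧ n ≤ p + c) := by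
  induction pages with
  | nil => simp
  | cons p pages ih =>
    intro s n
    simp only [List.foldl_cons]
    rw [ih]
    rw [innerFold_mem]
    constructor
    · rintro (⟨hs | ⟨d, hd, rfl, hb⟩⟩ | ⟨h1, h2, p', hp', hb⟩)
      · exact Or.inl hs
      · rw [PySem.List.mem_pyRange_one] at hd
        exact Or.inr ⟨hb.1, hb.2, p, List.mem_cons_self .., by omega, by omega⟩
      · exact Or.inr ⟨h1, h2, p', List.mem_cons_of_mem _ hp', hb⟩
    · rintro (hs | ⟨h1, h2, p', hp', hb1, hb2⟩)
      · exact Or.inl (Or.inl hs)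
      · rcases List.mem_cons.mp hp' with rfl | hp'
        · refine Or.inl (Or.inr ⟨n - p', ?_, by omega, h1, h2⟩)
          rw [PySem.List.mem_pyRange_one]; omega
        · exact Or.inr ⟨h1, h2, p', hp', hb1, hb2⟩

theorem outerFold_nodup (c mp : Int) (pages : List Int) :
    ∀ (s : PySem.Set Int), s.Nodup →
      (pages.foldl
        (fun out p =>
          (PySem.List.pyRange (-c) (c + 1) 1).foldl
            (fun out d => if 1 ≤ p + d ∧ p + d ≤ mp then PySem.Set.add out (p + d) else out) out)
        s).Nodup := by
  induction pages with
  | nil => intro s hs; simpa using hs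
  | cons p pages ih =>
    intro s hs
    simp only [List.foldl_cons]
    exact ih _ (innerFold_nodup mp p _ s hs)

-- A's output is strictly increasing and holds exactly the in-range pages within context of some page
theorem A_char (pages : List Int) (c mp : Int) :
    (expand_with_context_py pages c mp).Pairwise (· < ·) ∧
    (∀ n, n ∈ expand_with_context_py pages c mp ↔
      1 ≤ n ∧ n ≤ mp ∧ ∃ p ∈ pages, p - c ≤ n ∧ n ≤ p + c) := by
  unfold expand_with_context_py
  set S := pages.foldl
      (fun out p =>
        (PySem.List.pyRange (-c) (c + 1) 1).foldl
          (fun out d => if 1 ≤ p + d ∧ p + d ≤ mp then PySem.Set.add out (p + d) else out) out)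
      PySem.Set.empty with hS
  have hnodup : S.Nodup := outerFold_nodup c mp pages PySem.Set.empty (by simp [PySem.Set.empty])
  have hperm := PySem.List.sorted_perm S (fun x => x) false
  have hle : (PySem.List.sorted S (fun x => x) false).Pairwise (· ≤ ·) :=
    PySem.List.sorted_pairwise S (fun x => x)
  have hnd : (PySem.List.sorted S (fun x => x) false).Nodup := hperm.nodup_iff.mpr hnodup
  constructor
  · exact (hle.and hnd).imp (fun {a b} hab => lt_of_le_of_ne hab.1 hab.2)
  · intro n
    rw [hperm.mem_iff, hS, outerFold_mem]
    simp [PySem.Set.empty]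

-- the step function of B's sweep
def sweepStep (c mp : Int) (st : List Int × Int) (p : Int) : List Int × Int :=
  let lo := max (max (p - c) (st.2 + 1)) 1
  let hi := min (p + c) mp
  if lo ≤ hi then (st.1 ++ PySem.List.pyRange lo (hi + 1) 1, hi) else st

-- invariant of B's sweep over the sorted page list
theorem sweep_invariant (c mp : Int) :
    ∀ (l out : List Int) (last : Int),
      l.Pairwise (· ≤ ·) →
      out.Pairwise (· < ·) →
      (∀ n ∈ out, n ≤ last) →
      (∀ p ∈ l, ∀ n, p - c ≤ n → n ≤ last → 1 ≤ n → n ≤ mp → n ∈ out) →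
      ((l.foldl (sweepStep c mp) (out, last)).1.Pairwise (· < ·) ∧
       (∀ n ∈ (l.foldl (sweepStep c mp) (out, last)).1, n ≤ (l.foldl (sweepStep c mp) (out, last)).2) ∧
       (∀ n, n ∈ (l.foldl (sweepStep c mp) (out, last)).1 ↔
         n ∈ out ∨ (1 ≤ n ∧ n ≤ mp ∧ ∃ p ∈ l, p - c ≤ n ∧ n ≤ p + c))) := by
  intro l
  induction l with
  | nil => intro out last _ ho hb _; exact ⟨ho, hb, by simp⟩
  | cons p l ih =>
    intro out last hsort ho hb hcov
    have hple : ∀ q ∈ l, p ≤ q := fun q hq => (List.pairwise_cons.mp hsort).1 q hq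
    have hsort' := (List.pairwise_cons.mp hsort).2
    simp only [List.foldl_cons]
    by_cases hcase : max (max (p - c) (last + 1)) 1 ≤ min (p + c) mp
    · -- emitting branch
      set lo := max (max (p - c) (last + 1)) 1 with hlo
      set hi := min (p + c) mp with hhi
      have hstep : sweepStep c mp (out, last) p = (out ++ PySem.List.pyRange lo (hi + 1) 1, hi) := by
        simp only [sweepStep]; rw [if_pos hcase]
      rw [hstep]
      have ho' : (out ++ PySem.List.pyRange lo (hi + 1) 1).Pairwise (· < ·) := by
        rw [List.pairwise_append]
        refine ⟨ho, PySem.List.pairwise_lt_pyRange_one lo (hi + 1), ?_⟩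
        intro a ha b hb'
        rw [PySem.List.mem_pyRange_one] at hb'
        have := hb a ha
        omega
      have hb' : ∀ n ∈ out ++ PySem.List.pyRange lo (hi + 1) 1, n ≤ hi := by
        intro n hn
        rcases List.mem_append.mp hn with hn | hn
        · have := hb n hn; omega
        · rw [PySem.List.mem_pyRange_one] at hn; omega
      have hcov' : ∀ q ∈ l, ∀ n, q - c ≤ n → n ≤ hi → 1 ≤ n → n ≤ mp →
          n ∈ out ++ PySem.List.pyRange lo (hi + 1) 1 := by
        intro q hq n hqc hnhi h1 hmp
        have hpq := hple q hq
        by_cases hnlo : lo ≤ n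
        · exact List.mem_append.mpr (Or.inr (PySem.List.mem_pyRange_one.mpr ⟨hnlo, by omega⟩))
        · -- n < lo: must have n ≤ last, covered before
          have hnlast : n ≤ last := by omega
          exact List.mem_append.mpr (Or.inl (hcov p (List.mem_cons_self ..) n (by omega) hnlast h1 hmp))
      obtain ⟨r1, r2, r3⟩ := ih (out ++ PySem.List.pyRange lo (hi + 1) 1) hi hsort' ho' hb' hcov'
      refine ⟨r1, r2, ?_⟩
      intro n
      rw [r3]
      constructor
      · rintro (hn | ⟨h1, h2, q, hq, hb1, hb2⟩)
        · rcases List.mem_append.mp hn with hn | hn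
          · exact Or.inl hn
          · rw [PySem.List.mem_pyRange_one] at hn
            exact Or.inr ⟨by omega, by omega, p, List.mem_cons_self .., by omega, by omega⟩
        · exact Or.inr ⟨h1, h2, q, List.mem_cons_of_mem _ hq, hb1, hb2⟩
      · rintro (hn | ⟨h1, h2, q, hq, hb1, hb2⟩)
        · exact Or.inl (List.mem_append.mpr (Or.inl hn))
        · rcases List.mem_cons.mp hq with rfl | hq
          · -- covered by p itself
            by_cases hnlo : lo ≤ n
            · exact Or.inl (List.mem_append.mpr (Or.inr (PySem.List.mem_pyRange_one.mpr ⟨hnlo, by omega⟩)))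
            · have hnlast : n ≤ last := by omega
              exact Or.inl (List.mem_append.mpr (Or.inl (hcov q (List.mem_cons_self ..) n hb1 hnlast h1 h2)))
          · exact Or.inr ⟨h1, h2, q, hq, hb1, hb2⟩
    · -- skipping branch
      have hstep : sweepStep c mp (out, last) p = (out, last) := by
        simp only [sweepStep]; rw [if_neg hcase]
      rw [hstep]
      have hcov' : ∀ q ∈ l, ∀ n, q - c ≤ n → n ≤ last → 1 ≤ n → n ≤ mp → n ∈ out :=
        fun q hq => hcov q (List.mem_cons_of_mem _ hq)
      obtain ⟨r1, r2, r3⟩ := ih out last hsort' ho hb hcov'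
      refine ⟨r1, r2, ?_⟩
      intro n
      rw [r3]
      constructor
      · rintro (hn | ⟨h1, h2, q, hq, hb1, hb2⟩)
        · exact Or.inl hn
        · exact Or.inr ⟨h1, h2, q, List.mem_cons_of_mem _ hq, hb1, hb2⟩
      · rintro (hn | ⟨h1, h2, q, hq, hb1, hb2⟩)
        · exact Or.inl hn
        · rcases List.mem_cons.mp hq with rfl | hq
          · -- p's clamped window is empty above last: n ≤ last, hence already in out
            have hple' := hple
            have hnlast : n ≤ last := by omega
            exact Or.inl (hcov q (List.mem_cons_self ..) n hb1 hnlast h1 h2)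
          · exact Or.inr ⟨h1, h2, q, hq, hb1, hb2⟩

-- B's output is strictly increasing with the same membership (for context ≥ 0)
theorem B_char (pages : List Int) (c mp : Int) (hc : ¬ c < 0) :
    (expand_with_context_py_alt pages c mp).Pairwise (· < ·) ∧
    (∀ n, n ∈ expand_with_context_py_alt pages c mp ↔
      1 ≤ n ∧ n ≤ mp ∧ ∃ p ∈ pages, p - c ≤ n ∧ n ≤ p + c) := by
  unfold expand_with_context_py_alt
  rw [if_neg hc]
  have hsort : (PySem.List.sorted pages (fun x => x) false).Pairwise (· ≤ ·) :=
    PySem.List.sorted_pairwise pages (fun x => x)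
  have hperm := PySem.List.sorted_perm pages (fun x => x) false
  obtain ⟨r1, _, r3⟩ := sweep_invariant c mp (PySem.List.sorted pages (fun x => x) false) [] 0
    hsort (by simp) (by simp) (by intro p _ n _ h2 h3; omega)
  have hfold : (PySem.List.sorted pages (fun x => x) false).foldl
      (fun (st : List Int × Int) p =>
        let lo := max (max (p - c) (st.2 + 1)) 1
        let hi := min (p + c) mp
        if lo ≤ hi then (st.1 ++ PySem.List.pyRange lo (hi + 1) 1, hi) else st)
      ([], 0) = (PySem.List.sorted pages (fun x => x) false).foldl (sweepStep c mp) ([], 0) := rfl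
  rw [hfold]
  refine ⟨r1, ?_⟩
  intro n
  rw [r3]
  simp only [List.not_mem_nil, false_or]
  constructor
  · rintro ⟨h1, h2, q, hq, hb⟩
    exact ⟨h1, h2, q, hperm.mem_iff.mp hq, hb⟩
  · rintro ⟨h1, h2, q, hq, hb⟩
    exact ⟨h1, h2, q, hperm.mem_iff.mpr hq, hb⟩

-- ===== VERDICT (by name: the statement is the Claim_ definition above) =====
theorem expand_with_context_py_spec : Claim_equal_expand_with_context_py := by
  intro pages c mp _
  unfold Spec_expand_with_context_py
  obtain ⟨ha1, ha2⟩ := A_char pages c mp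
  by_cases hc : c < 0
  · have hB : expand_with_context_py_alt pages c mp = [] := by
      unfold expand_with_context_py_alt; rw [if_pos hc]
    rw [hB]
    apply ssorted_ext _ _ ha1 (by simp)
    intro n
    rw [ha2]
    simp only [List.not_mem_nil, iff_false]
    rintro ⟨_, _, p, _, hb1, hb2⟩
    omega
  · obtain ⟨hb1, hb2⟩ := B_char pages c mp hc
    apply ssorted_ext _ _ ha1 hb1
    intro n
    rw [ha2, hb2]
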